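-- pv_equiv track=rewrite | github.com/Lyle-Kottke/520-Exercise-2 | problem5/solutions/solution2.py | solve
-- ===== SOURCE A (Python) =====
-- def solve(n, a, b):
--     """
--     Find the maximum possible minimum number of pieces on any plate.
--
--     Args:
--         n: number of plates (2 <= n <= a + b)
--         a: number of pieces of cake 1 (1 <= a <= 100)
--         b: number of pieces of cake 2 (1 <= b <= 100)
--
--     Returns:
--         Maximum possible value x such that each plate has at least x pieces
--
--     Examples:
--         >>> distribute_cakes(5, 2, 3)
--         1
--         >>> distribute_cakes(4, 7, 10)
--         3
--     """
--     max_min_pieces = 0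
--
--     # Try all possible ways to split n plates between the two cakes
--     # i plates for cake 1, (n-i) plates for cake 2
--     for i in range(1, n):
--         plates_for_cake1 = i
--         plates_for_cake2 = n - i
--
--         # Minimum pieces on any plate from cake 1
--         min_pieces_cake1 = a // plates_for_cake1
--
--         # Minimum pieces on any plate from cake 2
--         min_pieces_cake2 = b // plates_for_cake2
--
--         # The bottleneck is the minimum of these two
--         min_pieces = min(min_pieces_cake1, min_pieces_cake2)
--
--         # Update the maximum
--         max_min_pieces = max(max_min_pieces, min_pieces)
--
--     return max_min_pieces
-- ===== SOURCE B (Python) =====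
-- def solve(n, a, b):
--     # Binary search on the answer x: x pieces per plate is achievable iff
--     # x == 0 or (n >= 2 and a >= x and b >= x and a // x + b // x >= n).
--     def feasible(x):
--         return x == 0 or (n >= 2 and a >= x and b >= x and a // x + b // x >= n)
--
--     lo = 0
--     hi = min(a, b)
--     if hi < 0:
--         hi = 0
--     while lo < hi:
--         mid = (lo + hi + 1) // 2
--         if feasible(mid):
--             lo = mid
--         else:
--             hi = mid - 1
--     return lo
-- ===== Notes on version B (the rewrite author's own statement) =====
-- stated objective: faster
-- what changed: Replaces A's linear scan over all n-1 splits with a binary search on the answer x using the O(1) feasibility test x==0 or (n>=2 and a>=x and b>=x and a//x+b//x>=n).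
import Mathlib
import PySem

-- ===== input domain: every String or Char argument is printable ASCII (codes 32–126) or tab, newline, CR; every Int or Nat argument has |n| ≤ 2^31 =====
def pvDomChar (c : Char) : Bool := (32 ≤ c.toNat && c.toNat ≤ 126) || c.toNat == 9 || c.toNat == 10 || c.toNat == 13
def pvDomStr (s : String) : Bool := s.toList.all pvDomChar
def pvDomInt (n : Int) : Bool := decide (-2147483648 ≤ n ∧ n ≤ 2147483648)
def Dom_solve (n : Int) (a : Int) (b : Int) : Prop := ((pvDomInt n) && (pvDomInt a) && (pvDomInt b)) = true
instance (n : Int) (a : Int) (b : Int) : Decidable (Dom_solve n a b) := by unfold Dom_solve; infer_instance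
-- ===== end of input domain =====

-- B replaces A's linear scan over all splits by a binary search on the answer
-- with an O(1) feasibility test (objective: faster).

-- ===== PORT A =====
def solve (n : Int) (a : Int) (b : Int) : Int :=
  (PySem.List.pyRange 1 n 1).foldl
    (fun m i => max m (min (PySem.Int.floordiv a i) (PySem.Int.floordiv b (n - i)))) 0

-- ===== PORT B =====
-- feasible(x) from Source B
def pvFeasible (n : Int) (a : Int) (b : Int) (x : Int) : Bool :=
  x == 0 || (decide (2 ≤ n) && decide (x ≤ a) && decide (x ≤ b) &&
             decide (n ≤ PySem.Int.floordiv a x + PySem.Int.floordiv b x))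

-- the `while lo < hi` loop of Source B
def pvLoop (n : Int) (a : Int) (b : Int) (lo : Int) (hi : Int) : Int :=
  if h : lo < hi then
    let mid := PySem.Int.floordiv (lo + hi + 1) 2
    have hb : lo + 1 ≤ mid ∧ mid ≤ hi := by
      show lo + 1 ≤ PySem.Int.floordiv (lo + hi + 1) 2 ∧ PySem.Int.floordiv (lo + hi + 1) 2 ≤ hi
      have h2 : lo + hi + 1 = (lo + 1) + hi := by ring
      rw [h2]
      exact PySem.Int.floordiv_two_mid_bounds (by omega)
    if pvFeasible n a b mid then pvLoop n a b mid hi else pvLoop n a b lo (mid - 1)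
  else lo
termination_by (hi - lo).toNat
decreasing_by
  · omega
  · omega

def solve_alt (n : Int) (a : Int) (b : Int) : Int :=
  let hi0 := min a b
  let hi := if hi0 < 0 then 0 else hi0
  pvLoop n a b 0 hi

-- ===== PRECONDITION & SPEC =====
def Spec_solve (n : Int) (a : Int) (b : Int) (out : Int) : Prop := out = solve_alt n a b
instance (n : Int) (a : Int) (b : Int) (out : Int) : Decidable (Spec_solve n a b out) := by unfold Spec_solve; infer_instance

-- ===== CLAIM (what is proved, stated in full; the proofs are below) =====
def Claim_equal_solve : Prop := ∀ (n : Int) (a : Int) (b : Int), Dom_solve n a b → Spec_solve n a b (solve n a b)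

-- ===== LEMMAS AND PROOFS =====

-- 'x pieces per plate is achievable' predicate, shared characterisation of both programs
def Feas (n a b x : Int) : Prop :=
  x = 0 ∨ (2 ≤ n ∧ x ≤ a ∧ x ≤ b ∧ n ≤ PySem.Int.floordiv a x + PySem.Int.floordiv b x)

-- A's per-split payoff
def pvF (n a b i : Int) : Int :=
  min (PySem.Int.floordiv a i) (PySem.Int.floordiv b (n - i))

lemma pvFeasible_iff (n a b x : Int) : pvFeasible n a b x = true ↔ Feas n a b x := by
  simp [pvFeasible, Feas]; tauto

lemma le_fd {q a d : Int} (hd : 0 < d) : q ≤ PySem.Int.floordiv a d ↔ q * d ≤ a :=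
  PySem.Int.le_floordiv_iff_mul_le hd

-- Feas is downward closed on positive x
lemma Feas_mono {n a b x y : Int} (hx : Feas n a b x) (hy1 : 1 ≤ y) (hyx : y ≤ x) :
    Feas n a b y := by
  rcases hx with h0 | ⟨hn, hxa, hxb, hsum⟩
  · omega
  · refine Or.inr ⟨hn, by omega, by omega, ?_⟩
    have hx0 : (0:Int) < x := by omega
    have hy0 : (0:Int) < y := by omega
    have hfa : PySem.Int.floordiv a x ≤ PySem.Int.floordiv a y := by
      rw [le_fd hy0]
      have h1 : PySem.Int.floordiv a x * x ≤ a := (le_fd hx0).mp le_rfl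
      have h2 : 0 ≤ PySem.Int.floordiv a x := by rw [le_fd hx0]; omega
      nlinarith
    have hfb : PySem.Int.floordiv b x ≤ PySem.Int.floordiv b y := by
      rw [le_fd hy0]
      have h1 : PySem.Int.floordiv b x * x ≤ b := (le_fd hx0).mp le_rfl
      have h2 : 0 ≤ PySem.Int.floordiv b x := by rw [le_fd hx0]; omega
      nlinarith
    omega

-- a maximal feasible x is unique
lemma Feas_unique {n a b r s : Int} (hr0 : 0 ≤ r) (hr : Feas n a b r) (hr1 : ¬ Feas n a b (r+1))
    (hs0 : 0 ≤ s) (hs : Feas n a b s) (hs1 : ¬ Feas n a b (s+1)) : r = s := by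
  by_contra hne
  rcases lt_or_gt_of_ne hne with h | h
  · exact hr1 (Feas_mono hs (by omega) (by omega))
  · exact hs1 (Feas_mono hr (by omega) (by omega))

-- general shape of A's running maximum
lemma foldl_max_char (f : Int → Int) (l : List Int) (c : Int) :
    c ≤ l.foldl (fun m i => max m (f i)) c ∧
    (∀ i ∈ l, f i ≤ l.foldl (fun m i => max m (f i)) c) ∧
    (l.foldl (fun m i => max m (f i)) c = c ∨ ∃ i ∈ l, l.foldl (fun m i => max m (f i)) c = f i) := by
  induction l generalizing c with
  | nil => simp
  | cons x xs ih =>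
    obtain ⟨h1, h2, h3⟩ := ih (max c (f x))
    refine ⟨by simp at h1 ⊢; omega, ?_, ?_⟩
    · intro i hi
      rw [List.mem_cons] at hi
      rcases hi with rfl | hi
      · exact (max_le_iff.mp h1).2
      · exact h2 i hi
    · rcases h3 with h | ⟨i, hi, hv⟩
      · rcases max_choice c (f x) with hc | hc
        · exact Or.inl (by rw [List.foldl_cons, h, hc])
        · exact Or.inr ⟨x, by simp, by rw [List.foldl_cons, h, hc]⟩
      · exact Or.inr ⟨i, by simp [hi], hv⟩

-- A's result is the greatest feasible x
lemma solve_char (n a b : Int) :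
    0 ≤ solve n a b ∧ Feas n a b (solve n a b) ∧ ¬ Feas n a b (solve n a b + 1) := by
  obtain ⟨h1, h2, h3⟩ := foldl_max_char (pvF n a b) (PySem.List.pyRange 1 n 1) 0
  have hMfold : solve n a b = (PySem.List.pyRange 1 n 1).foldl
      (fun m i => max m (pvF n a b i)) 0 := rfl
  rw [← hMfold] at h1 h2 h3
  set M := solve n a b with hM
  refine ⟨h1, ?_, ?_⟩
  · -- Feas M
    rcases h3 with h | ⟨i, hmem, hv⟩
    · exact Or.inl h
    · by_cases hM0 : M = 0
      · exact Or.inl hM0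
      · rw [PySem.List.mem_pyRange_one] at hmem
        have hi0 : (0:Int) < i := by omega
        have hni0 : (0:Int) < n - i := by omega
        have hMa : M ≤ PySem.Int.floordiv a i := by
          rw [hv]; exact min_le_left _ _
        have hMb : M ≤ PySem.Int.floordiv b (n - i) := by
          rw [hv]; exact min_le_right _ _
        have hMia : M * i ≤ a := (le_fd hi0).mp hMa
        have hMib : M * (n - i) ≤ b := (le_fd hni0).mp hMb
        have hM0' : (0:Int) < M := by omega
        refine Or.inr ⟨by omega, by nlinarith, by nlinarith, ?_⟩
        have hia : i ≤ PySem.Int.floordiv a M := by rw [le_fd hM0']; nlinarith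
        have hib : n - i ≤ PySem.Int.floordiv b M := by rw [le_fd hM0']; nlinarith
        omega
  · -- ¬ Feas (M+1)
    intro hfe
    rcases hfe with h0 | ⟨hn, hxa, hxb, hsum⟩
    · omega
    · have hx0 : (0:Int) < M + 1 := by omega
      set p := PySem.Int.floordiv a (M + 1) with hp
      set q := PySem.Int.floordiv b (M + 1) with hq
      have hp1 : 1 ≤ p := by rw [hp, le_fd hx0]; omega
      have hq1 : 1 ≤ q := by rw [hq, le_fd hx0]; omega
      have hpa : p * (M + 1) ≤ a := (le_fd hx0).mp le_rfl
      have hqb : q * (M + 1) ≤ b := (le_fd hx0).mp le_rfl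
      set i := min p (n - 1) with hi
      have hip : i ≤ p := by omega
      have hi1 : 1 ≤ i := by omega
      have hin : i < n := by omega
      have hiq : n - i ≤ q := by omega
      have hxa' : M + 1 ≤ PySem.Int.floordiv a i := by
        rw [le_fd (by omega : (0:Int) < i)]; nlinarith
      have hxb' : M + 1 ≤ PySem.Int.floordiv b (n - i) := by
        rw [le_fd (by omega : (0:Int) < n - i)]; nlinarith
      have hle := h2 i (by rw [PySem.List.mem_pyRange_one]; omega)
      have : M + 1 ≤ pvF n a b i := le_min hxa' hxb'
      omega

-- the loop invariant of B's binary search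
lemma pvLoop_char (n a b : Int) (k : Nat) : ∀ (lo hi : Int), (hi - lo).toNat ≤ k → 0 ≤ lo →
    lo ≤ hi → Feas n a b lo → ¬ Feas n a b (hi + 1) →
    0 ≤ pvLoop n a b lo hi ∧ Feas n a b (pvLoop n a b lo hi) ∧
    ¬ Feas n a b (pvLoop n a b lo hi + 1) := by
  induction k with
  | zero =>
    intro lo hi hk h0 hle hF hH
    have heq : lo = hi := by omega
    rw [pvLoop]
    simp only [heq, lt_self_iff_false, dite_false]
    exact ⟨by omega, heq ▸ hF, hH⟩
  | succ k ih =>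
    intro lo hi hk h0 hle hF hH
    rw [pvLoop]
    by_cases h : lo < hi
    · simp only [dif_pos h]
      set mid := PySem.Int.floordiv (lo + hi + 1) 2 with hmid
      have hb : lo + 1 ≤ mid ∧ mid ≤ hi := by
        rw [hmid, (by ring : lo + hi + 1 = (lo + 1) + hi)]
        exact PySem.Int.floordiv_two_mid_bounds (by omega)
      by_cases hfe : pvFeasible n a b mid = true
      · simp only [hfe, if_true]
        exact ih mid hi (by omega) (by omega) (by omega)
          ((pvFeasible_iff n a b mid).mp hfe) hH
      · simp only [hfe]
        refine ih lo (mid - 1) (by omega) h0 (by omega) hF ?_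
        have hnf : ¬ Feas n a b mid := fun hc => hfe ((pvFeasible_iff n a b mid).mpr hc)
        simpa using hnf
    · simp only [dif_neg h]
      have heq : lo = hi := by omega
      exact ⟨h0, hF, heq ▸ hH⟩

-- B's result is the greatest feasible x
lemma solve_alt_char (n a b : Int) :
    0 ≤ solve_alt n a b ∧ Feas n a b (solve_alt n a b) ∧
    ¬ Feas n a b (solve_alt n a b + 1) := by
  unfold solve_alt
  set hi := if min a b < 0 then 0 else min a b with hhi
  have hhi0 : 0 ≤ hi := by rw [hhi]; split <;> omega
  have hab : min a b ≤ hi := by rw [hhi]; split <;> omega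
  refine pvLoop_char n a b (hi - 0).toNat 0 hi (by omega) (by omega) hhi0 (Or.inl rfl) ?_
  intro hc
  rcases hc with h0 | ⟨hn, hxa, hxb, hsum⟩
  · omega
  · omega

-- ===== VERDICT (by name: the statement is the Claim_ definition above) =====
theorem solve_spec : Claim_equal_solve := by
  intro n a b _
  unfold Spec_solve
  obtain ⟨h1, h2, h3⟩ := solve_char n a b
  obtain ⟨g1, g2, g3⟩ := solve_alt_char n a b
  exact Feas_unique h1 h2 h3 g1 g2 g3
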